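-- pv_equiv track=rewrite | github.com/abhinav13/python-learn | puzzles/unsolved/goolgeq2.py | generous
-- ===== SOURCE A (Python) =====
-- def generous(number):
--     if number == 1:
--         return [1]
--     if number == 0 or number < 0:
--         return []
--     tot = 0
--     num_persons = []
--     a = 1
--     num_persons.append(a)
--     while tot < number:
--         b = a*2
--         tot = tot + b
--         if tot < number:
--             num_persons.append(b)
--         a = b
--     return num_persons
-- ===== SOURCE B (Python) =====
-- def generous(number):
--     if number <= 0:
--         return []
--     m = max(0, (number + 1).bit_length() - 2)
--     return [2 ** i for i in range(m + 1)]
-- ===== Notes on version B (the rewrite author's own statement) =====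
-- stated objective: simpler
-- what changed: Replaced the running-total while-loop that appends doubling values with a closed-form exponent count via (number+1).bit_length() and a single list comprehension of powers of two.
import Mathlib
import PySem

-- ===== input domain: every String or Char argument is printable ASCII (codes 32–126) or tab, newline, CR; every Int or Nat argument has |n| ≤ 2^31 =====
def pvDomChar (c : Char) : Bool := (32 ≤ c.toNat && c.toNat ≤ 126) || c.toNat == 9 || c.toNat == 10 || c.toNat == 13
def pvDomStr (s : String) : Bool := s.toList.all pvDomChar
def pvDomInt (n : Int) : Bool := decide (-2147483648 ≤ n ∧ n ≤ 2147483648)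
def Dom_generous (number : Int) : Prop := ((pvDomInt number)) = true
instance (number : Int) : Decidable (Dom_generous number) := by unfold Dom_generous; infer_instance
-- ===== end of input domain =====

-- B replaces A's accumulator while-loop with a closed-form bit-length count of the powers (objective: simpler).

-- ===== PORT A =====
-- A's while-loop; the hypothesis `ha : 0 < a` records the invariant needed for termination
def genLoop (number tot a : Int) (ha : 0 < a) (acc : List Int) : List Int :=
  if tot < number then
    let b := a * 2
    let tot' := tot + b
    genLoop number tot' b (by omega) (if tot' < number then acc ++ [b] else acc)
  else acc
termination_by (number - tot).toNat
decreasing_by omega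

def generous (number : Int) : List Int :=
  if number = 1 then [1]
  else if number = 0 ∨ number < 0 then []
  else genLoop number 0 1 (by omega) [1]

-- ===== PORT B =====
-- Python's int.bit_length for nonnegative arguments
def bitLength (x : Nat) : Nat := if x = 0 then 0 else Nat.log2 x + 1

def generous_alt (number : Int) : List Int :=
  if number ≤ 0 then []
  else
    -- Nat truncated subtraction mirrors Source B's max(0, bit_length - 2)
    let m : Nat := bitLength (number + 1).toNat - 2
    (List.range (m + 1)).map (fun i => (2 : Int) ^ i)

-- ===== PRECONDITION & SPEC =====
def Spec_generous (number : Int) (out : List Int) : Prop := out = generous_alt number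
instance (number : Int) (out : List Int) : Decidable (Spec_generous number out) := by unfold Spec_generous; infer_instance

-- ===== CLAIM (what is proved, stated in full; the proofs are below) =====
def Claim_equal_generous : Prop := ∀ (number : Int), Dom_generous number → Spec_generous number (generous number)

-- ===== LEMMAS AND PROOFS =====

-- how many powers the loop still appends, seen from state (tot, a) = (2^(k+1)-2, 2^k)
def tailLen (n : Int) (k : Nat) : Nat := bitLength (n + 1).toNat - 2 - k

theorem bitLength_le_iff (x t : Nat) : bitLength x ≤ t ↔ x < 2 ^ t := by
  unfold bitLength
  split
  · subst ‹x = 0›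
    exact ⟨fun _ => Nat.two_pow_pos t, fun _ => Nat.zero_le t⟩
  · rw [Nat.add_one_le_iff, Nat.log2_lt ‹x ≠ 0›]

theorem le_bitLength (x t : Nat) (h : 2 ^ t ≤ x) : t + 1 ≤ bitLength x := by
  have hx : x ≠ 0 := by have := Nat.two_pow_pos t; omega
  unfold bitLength
  rw [if_neg hx]
  exact Nat.succ_le_succ ((Nat.le_log2 hx).mpr h)

theorem tailLen_eq_zero (n : Int) (k : Nat) (h : n ≤ 2 * 2 ^ (k + 1) - 2) : tailLen n k = 0 := by
  have hc : ((2 ^ (k + 2) : Nat) : Int) = 2 ^ (k + 2) := by push_cast; ring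
  have h2 : (2 : Int) ^ (k + 2) = 2 * 2 ^ (k + 1) := by ring
  have hb0 : (1 : Int) ≤ 2 ^ (k + 1) := one_le_pow₀ (by norm_num)
  have hlt : (n + 1).toNat < 2 ^ (k + 2) := by omega
  have := (bitLength_le_iff (n + 1).toNat (k + 2)).mpr hlt
  unfold tailLen
  omega

theorem genLoop_eq (j : Nat) : ∀ (n : Int) (k : Nat) (acc : List Int) (hp : (0 : Int) < 2 ^ k),
    n ≤ 2 ^ (k + 1) - 2 + j →
    genLoop n (2 ^ (k + 1) - 2) (2 ^ k) hp acc
      = acc ++ (List.range' (k + 1) (tailLen n k)).map (fun i => (2 : Int) ^ i) := by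
  induction j with
  | zero =>
    intro n k acc hp hle
    have hb : (1 : Int) ≤ 2 ^ (k + 1) := one_le_pow₀ (by norm_num)
    rw [genLoop, if_neg (by omega), tailLen_eq_zero n k (by omega)]
    simp
  | succ j ih =>
    intro n k acc hp hle
    by_cases h : 2 ^ (k + 1) - 2 < n
    · rw [genLoop, if_pos h]
      have e1 : (2 : Int) ^ k * 2 = 2 ^ (k + 1) := by ring
      have e2 : (2 : Int) ^ (k + 1) - 2 + 2 ^ (k + 1) = 2 ^ (k + 1 + 1) - 2 := by ring
      simp only [e1, e2]
      have hb : (2 : Int) ≤ 2 ^ (k + 1) := by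
        calc (2 : Int) = 2 ^ 1 := by norm_num
        _ ≤ 2 ^ (k + 1) := pow_le_pow_right₀ (by norm_num) (by omega)
      have h3 : (2 : Int) ^ (k + 1 + 1) = 2 * 2 ^ (k + 1) := by ring
      rw [ih n (k + 1) _ (by positivity) (by omega)]
      by_cases h2 : 2 ^ (k + 1 + 1) - 2 < n
      · rw [if_pos h2]
        have hge : 2 ^ (k + 2) ≤ (n + 1).toNat := by
          have hc : ((2 ^ (k + 2) : Nat) : Int) = 2 ^ (k + 2) := by push_cast; ring
          have h4 : (2 : Int) ^ (k + 2) = 2 * 2 ^ (k + 1) := by ring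
          omega
        have hB := le_bitLength (n + 1).toNat (k + 2) hge
        have ht : tailLen n k = tailLen n (k + 1) + 1 := by unfold tailLen; omega
        rw [ht, List.range'_succ]
        simp
      · rw [if_neg h2]
        have hz : tailLen n k = 0 := tailLen_eq_zero n k (by omega)
        have h5 : (2 : Int) ^ (k + 1 + 1 + 1) = 4 * 2 ^ (k + 1) := by ring
        have h6 : (2 : Int) ^ (k + 1 + 1) = 2 * 2 ^ (k + 1) := by ring
        have hz' : tailLen n (k + 1) = 0 := tailLen_eq_zero n (k + 1) (by omega)
        rw [hz, hz']
        simp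
    · have hb : (1 : Int) ≤ 2 ^ (k + 1) := one_le_pow₀ (by norm_num)
      rw [genLoop, if_neg h, tailLen_eq_zero n k (by omega)]
      simp

-- ===== VERDICT (by name: the statement is the Claim_ definition above) =====
theorem generous_spec : Claim_equal_generous := by
  intro n _
  unfold Spec_generous generous generous_alt
  by_cases h1 : n = 1
  · subst h1; decide
  · rw [if_neg h1]
    by_cases h0 : n = 0 ∨ n < 0
    · rw [if_pos h0, if_pos (by omega)]
    · rw [if_neg h0, if_neg (by omega)]
      have h2 : 2 ≤ n := by omega
      have key := genLoop_eq n.toNat n 0 [1] (by norm_num) (by norm_num)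
      norm_num at key
      rw [key]
      have hm : tailLen n 0 = bitLength (n + 1).toNat - 2 := by unfold tailLen; omega
      simp only [← hm, List.range_eq_range', List.range'_succ]
      simp
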